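-- pv_equiv track=rewrite | github.com/silverdavi/homebook | packages/generator/src/math_explanations.py | explain_simplify
-- ===== SOURCE A (Python) =====
-- import math
-- from typing import List, Tuple
--
-- def _factors(n: int) -> List[int]:
--     """Return all factors of n in sorted order."""
--     result = []
--     for i in range(1, n + 1):
--         if n % i == 0:
--             result.append(i)
--     return result
--
-- def explain_simplify(num: int, den: int) -> str:
--     """Step-by-step simplification explanation.
--
--     Example output:
--         Start with 6/8
--         Find GCF of 6 and 8:
--           Factors of 6: 1, 2, 3, 6
--           Factors of 8: 1, 2, 4, 8
--           GCF = 2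
--         Divide both by GCF:
--           6 ÷ 2 = 3
--           8 ÷ 2 = 4
--         Simplified: 3/4
--     """
--     gcf = math.gcd(num, den)
--     simplified_num = num // gcf
--     simplified_den = den // gcf
--
--     lines = [
--         f"Start with {num}/{den}",
--         f"Find GCF of {num} and {den}:",
--     ]
--
--     factors_num = _factors(num)
--     factors_den = _factors(den)
--
--     lines.extend([
--         f"  Factors of {num}: {', '.join(str(f) for f in factors_num)}",
--         f"  Factors of {den}: {', '.join(str(f) for f in factors_den)}",
--         f"  GCF = {gcf}",
--         f"Divide both by GCF:",
--         f"  {num} ÷ {gcf} = {simplified_num}",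
--         f"  {den} ÷ {gcf} = {simplified_den}",
--         f"Simplified: {simplified_num}/{simplified_den}",
--     ])
--     return "\n".join(lines)
-- ===== SOURCE B (Python) =====
-- import math
--
-- def _factors(n):
--     """Divisors of n in increasing order, found in divisor pairs up to sqrt(n)."""
--     small = []
--     large = []
--     i = 1
--     while i * i <= n:
--         if n % i == 0:
--             small.append(i)
--             if i != n // i:
--                 large.append(n // i)
--         i += 1
--     large.reverse()
--     return small + large
--
-- def explain_simplify(num, den):
--     gcf = math.gcd(num, den)
--     sn = num // gcf
--     sd = den // gcf
--     fn = ", ".join(str(f) for f in _factors(num))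
--     fd = ", ".join(str(f) for f in _factors(den))
--     return (
--         f"Start with {num}/{den}\n"
--         f"Find GCF of {num} and {den}:\n"
--         f"  Factors of {num}: {fn}\n"
--         f"  Factors of {den}: {fd}\n"
--         f"  GCF = {gcf}\n"
--         "Divide both by GCF:\n"
--         f"  {num} \u00f7 {gcf} = {sn}\n"
--         f"  {den} \u00f7 {gcf} = {sd}\n"
--         f"Simplified: {sn}/{sd}"
--     )
-- ===== Notes on version B (the rewrite author's own statement) =====
-- stated objective: faster
-- what changed: The factor list is built by enumerating divisor pairs (i, n//i) only up to sqrt(n) and appending the large cofactors in reverse, instead of testing every integer from 1 to n; the output text is assembled as one f-string template instead of a joined list of lines.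
import Mathlib
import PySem

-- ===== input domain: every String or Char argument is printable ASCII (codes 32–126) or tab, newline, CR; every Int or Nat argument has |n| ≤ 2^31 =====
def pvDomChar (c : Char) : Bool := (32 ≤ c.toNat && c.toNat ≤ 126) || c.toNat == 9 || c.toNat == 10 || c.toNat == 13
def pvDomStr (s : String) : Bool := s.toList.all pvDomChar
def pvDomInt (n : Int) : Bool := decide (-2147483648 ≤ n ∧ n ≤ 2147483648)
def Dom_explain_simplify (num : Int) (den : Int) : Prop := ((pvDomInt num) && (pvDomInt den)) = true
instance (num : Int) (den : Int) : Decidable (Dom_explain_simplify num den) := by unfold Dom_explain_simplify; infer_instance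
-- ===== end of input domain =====

-- B replaces A's 1..n trial-division factor scan by divisor-pair enumeration up to sqrt(n)
-- (asymptotically faster, as measured) and assembles the text as one flat template.

-- ===== PORT A =====
-- _factors: result = []; for i in range(1, n+1): if n % i == 0: result.append(i)
def pyFactorsA (n : Int) : List Int :=
  (PySem.List.pyRange 1 (n + 1) 1).foldl
    (fun result i => if PySem.Int.mod n i == 0 then result ++ [i] else result) []

def explain_simplify (num : Int) (den : Int) : String :=
  let gcf : Int := (Int.gcd num den : Int)
  let simplified_num := PySem.Int.floordiv num gcf
  let simplified_den := PySem.Int.floordiv den gcf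
  let lines : List String :=
    ["Start with " ++ PySem.Int.toStr num ++ "/" ++ PySem.Int.toStr den,
     "Find GCF of " ++ PySem.Int.toStr num ++ " and " ++ PySem.Int.toStr den ++ ":"]
  let factors_num := pyFactorsA num
  let factors_den := pyFactorsA den
  let lines := lines ++
    ["  Factors of " ++ PySem.Int.toStr num ++ ": " ++
        PySem.Str.join ", " (factors_num.map PySem.Int.toStr),
     "  Factors of " ++ PySem.Int.toStr den ++ ": " ++
        PySem.Str.join ", " (factors_den.map PySem.Int.toStr),
     "  GCF = " ++ PySem.Int.toStr gcf,
     "Divide both by GCF:",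
     "  " ++ PySem.Int.toStr num ++ " ÷ " ++ PySem.Int.toStr gcf ++ " = " ++ PySem.Int.toStr simplified_num,
     "  " ++ PySem.Int.toStr den ++ " ÷ " ++ PySem.Int.toStr gcf ++ " = " ++ PySem.Int.toStr simplified_den,
     "Simplified: " ++ PySem.Int.toStr simplified_num ++ "/" ++ PySem.Int.toStr simplified_den]
  PySem.Str.join "\n" lines

-- ===== PORT B =====
-- termination measure fact for the while loop (cited by name in decreasing_by)
theorem pvDecHelper (n i : Int) (h : i * i ≤ n) :
    (n + 1 - (i + 1)).toNat < (n + 1 - i).toNat := by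
  have hii : i ≤ i * i := by
    rcases le_total i 0 with h0 | h0
    · exact h0.trans (mul_self_nonneg i)
    · rcases h0.lt_or_eq with h1 | h1
      · exact le_mul_of_one_le_left h1.le
          (by rw [Int.lt_iff_add_one_le, zero_add] at h1; exact h1)
      · rw [← h1]; exact mul_self_nonneg 0
  have hin : i ≤ n := hii.trans h
  have h1 : n + 1 - (i + 1) < n + 1 - i := sub_lt_sub_left (lt_add_one i) (n + 1)
  have h2 : 0 < n + 1 - i := sub_pos.mpr (hin.trans_lt (lt_add_one n))
  exact (Int.toNat_lt_toNat h2).mpr h1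

-- while i * i <= n: if n % i == 0: small.append(i); if i != n // i: large.append(n // i); i += 1
def factorLoop (n i : Int) (small large : List Int) : List Int × List Int :=
  if i * i ≤ n then
    if PySem.Int.mod n i == 0 then
      factorLoop n (i + 1) (small ++ [i])
        (if i != PySem.Int.floordiv n i then large ++ [PySem.Int.floordiv n i] else large)
    else factorLoop n (i + 1) small large
  else (small, large)
termination_by (n + 1 - i).toNat
decreasing_by
  · exact pvDecHelper n i (by assumption)
  · exact pvDecHelper n i (by assumption)

-- _factors of Source B: large.reverse(); return small + large
def factorsB (n : Int) : List Int :=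
  let p := factorLoop n 1 [] []
  p.1 ++ p.2.reverse

def explain_simplify_alt (num : Int) (den : Int) : String :=
  let gcf : Int := (Int.gcd num den : Int)
  let sn := PySem.Int.floordiv num gcf
  let sd := PySem.Int.floordiv den gcf
  let fn := PySem.Str.join ", " ((factorsB num).map PySem.Int.toStr)
  let fd := PySem.Str.join ", " ((factorsB den).map PySem.Int.toStr)
  "Start with " ++ PySem.Int.toStr num ++ "/" ++ PySem.Int.toStr den ++ "\n" ++
  "Find GCF of " ++ PySem.Int.toStr num ++ " and " ++ PySem.Int.toStr den ++ ":\n" ++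
  "  Factors of " ++ PySem.Int.toStr num ++ ": " ++ fn ++ "\n" ++
  "  Factors of " ++ PySem.Int.toStr den ++ ": " ++ fd ++ "\n" ++
  "  GCF = " ++ PySem.Int.toStr gcf ++ "\n" ++
  "Divide both by GCF:\n" ++
  "  " ++ PySem.Int.toStr num ++ " ÷ " ++ PySem.Int.toStr gcf ++ " = " ++ PySem.Int.toStr sn ++ "\n" ++
  "  " ++ PySem.Int.toStr den ++ " ÷ " ++ PySem.Int.toStr gcf ++ " = " ++ PySem.Int.toStr sd ++ "\n" ++
  "Simplified: " ++ PySem.Int.toStr sn ++ "/" ++ PySem.Int.toStr sd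

-- ===== PRECONDITION & SPEC =====
-- Python A raises ZeroDivisionError exactly when num = den = 0 (gcd = 0); that input is excluded.
def Pre_explain_simplify (num : Int) (den : Int) : Prop := ¬(num = 0 ∧ den = 0)
instance (num : Int) (den : Int) : Decidable (Pre_explain_simplify num den) := by
  unfold Pre_explain_simplify; infer_instance
def pvWitness_explain_simplify : Int × Int := (6, 8)

def Spec_explain_simplify (num : Int) (den : Int) (out : String) : Prop :=
  out = explain_simplify_alt num den
instance (num : Int) (den : Int) (out : String) : Decidable (Spec_explain_simplify num den out) := by
  unfold Spec_explain_simplify; infer_instance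

-- ===== CLAIM (what is proved, stated in full; the proofs are below) =====
def Claim_equal_explain_simplify : Prop :=
  ∀ (num : Int) (den : Int), Dom_explain_simplify num den → Pre_explain_simplify num den →
    Spec_explain_simplify num den (explain_simplify num den)

-- ===== LEMMAS AND PROOFS =====

theorem strEq (s t : String) (h : s.toList = t.toList) : s = t := by
  rw [← String.ofList_toList (s := s), ← String.ofList_toList (s := t), h]

-- integer sqrt used only in the proofs
def sqI (n : Int) : Int := (Nat.sqrt n.toNat : Int)

theorem le_sqI_iff (n i : Int) (hi : 1 ≤ i) : i ≤ sqI n ↔ i * i ≤ n := by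
  unfold sqI
  by_cases hn : n ≤ 0
  · have hN : n.toNat = 0 := by omega
    rw [hN]
    exact iff_of_false (by simp; omega) (by nlinarith)
  · replace hn : 0 < n := by omega
    have hI : ((i.toNat : Int)) = i := Int.toNat_of_nonneg (by omega)
    have hN : ((n.toNat : Int)) = n := Int.toNat_of_nonneg (by omega)
    have key := Nat.le_sqrt (m := i.toNat) (n := n.toNat)
    constructor
    · intro h
      have h2 : i.toNat * i.toNat ≤ n.toNat := key.mp (by omega)
      zify at h2
      rw [hI, hN] at h2
      exact h2
    · intro h
      have h2 : i.toNat * i.toNat ≤ n.toNat := by zify; rw [hI, hN]; exact h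
      have := key.mpr h2
      omega

theorem sqI_nonneg (n : Int) : 0 ≤ sqI n := by unfold sqI; positivity

theorem sqI_sq_le (n : Int) (hn : 0 ≤ n) : sqI n * sqI n ≤ n := by
  unfold sqI
  have h := Nat.sqrt_le n.toNat
  have hn0 : (n.toNat : Int) = n := Int.toNat_of_nonneg hn
  zify at h; omega

theorem lt_sqI_succ (n : Int) (hn : 0 ≤ n) : n < (sqI n + 1) * (sqI n + 1) := by
  unfold sqI
  have h := Nat.lt_succ_sqrt n.toNat
  have hn0 : (n.toNat : Int) = n := Int.toNat_of_nonneg hn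
  zify at h
  calc n = (n.toNat : Int) := hn0.symm
    _ < _ := by push_cast at h ⊢; omega

theorem factorLoop_spec (n : Int) : ∀ (i : Int) (small large : List Int), 1 ≤ i →
    factorLoop n i small large =
      (small ++ (PySem.List.pyRange i (sqI n + 1) 1).filter (fun j => PySem.Int.mod n j == 0),
       large ++ ((PySem.List.pyRange i (sqI n + 1) 1).filter
          (fun j => PySem.Int.mod n j == 0 && j != PySem.Int.floordiv n j)).map
          (fun j => PySem.Int.floordiv n j)) := by
  intro i small large
  induction i, small, large using factorLoop.induct n with
  | case1 i small large hle hmod ih =>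
    intro hi
    have hsq : i ≤ sqI n := (le_sqI_iff n i hi).mpr hle
    have ih' := ih (by omega)
    simp only [dite_eq_ite] at ih'
    have hcons : PySem.List.pyRange i (sqI n + 1) 1 =
        i :: PySem.List.pyRange (i + 1) (sqI n + 1) 1 :=
      PySem.List.pyRange_one_cons (by omega)
    rw [factorLoop, if_pos hle, if_pos hmod, ih', hcons]
    simp only [List.filter_cons, hmod, Bool.true_and, List.map_cons]
    by_cases hne : (i != PySem.Int.floordiv n i) = true
    · simp [hne, List.append_assoc]
    · simp only [Bool.not_eq_true] at hne
      simp [hne, List.append_assoc]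
  | case2 i small large hle hmod ih =>
    intro hi
    have hsq : i ≤ sqI n := (le_sqI_iff n i hi).mpr hle
    have ih' := ih (by omega)
    have hcons : PySem.List.pyRange i (sqI n + 1) 1 =
        i :: PySem.List.pyRange (i + 1) (sqI n + 1) 1 :=
      PySem.List.pyRange_one_cons (by omega)
    rw [factorLoop, if_pos hle, if_neg hmod, ih', hcons]
    have hmod' : (PySem.Int.mod n i == 0) = false := by
      simp only [Bool.not_eq_true] at hmod; exact hmod
    simp [List.filter_cons, hmod']
  | case3 i small large hle =>
    intro hi
    have hsq : ¬ i ≤ sqI n := fun h => hle ((le_sqI_iff n i hi).mp h)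
    rw [factorLoop, if_neg hle]
    rw [PySem.List.pyRange_one_eq_nil (by omega)]
    simp

-- abbreviations for the three lists involved (proof-side only)
def smallD (n : Int) : List Int :=
  (PySem.List.pyRange 1 (sqI n + 1) 1).filter (fun j => PySem.Int.mod n j == 0)
def bigD (n : Int) : List Int :=
  ((PySem.List.pyRange 1 (sqI n + 1) 1).filter
      (fun j => PySem.Int.mod n j == 0 && j != PySem.Int.floordiv n j)).map
    (fun j => PySem.Int.floordiv n j)
def divsR (n : Int) : List Int :=
  (PySem.List.pyRange 1 (n + 1) 1).filter (fun j => PySem.Int.mod n j == 0)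

theorem mem_smallD (n x : Int) : x ∈ smallD n ↔ 1 ≤ x ∧ x ≤ sqI n ∧ x ∣ n := by
  unfold smallD
  simp only [List.mem_filter, PySem.List.mem_pyRange_one, beq_iff_eq,
    PySem.Int.mod_eq_zero_iff_dvd]
  constructor
  · rintro ⟨⟨h1, h2⟩, h3⟩
    exact ⟨h1, by omega, h3⟩
  · rintro ⟨h1, h2, h3⟩
    exact ⟨⟨h1, by omega⟩, h3⟩

theorem mem_divsR (n x : Int) : x ∈ divsR n ↔ 1 ≤ x ∧ x ≤ n ∧ x ∣ n := by
  unfold divsR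
  simp only [List.mem_filter, PySem.List.mem_pyRange_one, beq_iff_eq,
    PySem.Int.mod_eq_zero_iff_dvd]
  constructor
  · rintro ⟨⟨h1, h2⟩, h3⟩
    exact ⟨h1, by omega, h3⟩
  · rintro ⟨h1, h2, h3⟩
    exact ⟨⟨h1, by omega⟩, h3⟩

theorem mem_bigD (n x : Int) : x ∈ bigD n ↔
    ∃ j, (1 ≤ j ∧ j ≤ sqI n ∧ j ∣ n ∧ j ≠ PySem.Int.floordiv n j) ∧
      x = PySem.Int.floordiv n j := by
  unfold bigD
  simp only [List.mem_map, List.mem_filter, PySem.List.mem_pyRange_one, beq_iff_eq,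
    PySem.Int.mod_eq_zero_iff_dvd, Bool.and_eq_true, bne_iff_ne, ne_eq]
  constructor
  · rintro ⟨j, ⟨⟨h1, h2⟩, h3, h4⟩, h5⟩
    exact ⟨j, ⟨h1, by omega, h3, h4⟩, h5.symm⟩
  · rintro ⟨j, ⟨h1, h2, h3, h4⟩, h5⟩
    exact ⟨j, ⟨⟨h1, by omega⟩, h3, h4⟩, h5.symm⟩

-- arithmetic of a divisor pair (j, n / j), j ≤ sqrt n < n / j
theorem cofactor_facts (n j : Int) (h1 : 1 ≤ j) (h2 : j ≤ sqI n) (h3 : j ∣ n)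
    (h4 : j ≠ PySem.Int.floordiv n j) :
    sqI n < PySem.Int.floordiv n j ∧ PySem.Int.floordiv n j ≤ n ∧
      1 ≤ PySem.Int.floordiv n j ∧ PySem.Int.floordiv n j ∣ n := by
  have hn : 1 ≤ n := by
    have := sqI_nonneg n
    have h5 : 1 ≤ sqI n := by omega
    have := (le_sqI_iff n 1 (by omega)).mp h5
    omega
  rw [PySem.Int.floordiv_eq_ediv_of_pos (by omega)] at h4 ⊢
  set q := n / j with hq
  have hqj : q * j = n := Int.ediv_mul_cancel h3
  have hq1 : 1 ≤ q := by nlinarith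
  have hsq : sqI n * sqI n ≤ n := sqI_sq_le n (by omega)
  refine ⟨?_, by nlinarith, hq1, Dvd.intro j (by linarith [mul_comm j q])⟩
  by_contra hqle
  push_neg at hqle
  -- q ≤ sqI n together with j ≤ sqI n forces j = q = sqI n, contradicting j ≠ q
  have e1 : q * j ≤ q * sqI n := by nlinarith
  have e2 : q * sqI n ≤ sqI n * sqI n := by nlinarith
  have e3 : q * j = q * sqI n := by omega
  have e4 : q * sqI n = sqI n * sqI n := by omega
  have hj : j = sqI n := by
    have := mul_left_cancel₀ (a := q) (by omega) e3; omega
  have hqe : q = sqI n := by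
    have := mul_right_cancel₀ (b := sqI n) (by omega) e4; omega
  omega

-- a divisor above sqrt n is the cofactor of its own cofactor
theorem big_divisor_pair (n x : Int) (h1 : 1 ≤ x) (h2 : x ≤ n) (h3 : x ∣ n)
    (h4 : sqI n < x) :
    1 ≤ n / x ∧ n / x ≤ sqI n ∧ n / x ∣ n ∧ n / x ≠ PySem.Int.floordiv n (n / x) ∧
      x = PySem.Int.floordiv n (n / x) := by
  have hn : 1 ≤ n := by omega
  set j := n / x with hj
  have hjx : j * x = n := Int.ediv_mul_cancel h3
  have hj1 : 1 ≤ j := by nlinarith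
  have hjle : j ≤ sqI n := by
    by_contra hc
    push_neg at hc
    have hb := lt_sqI_succ n (by omega)
    have hs := sqI_nonneg n
    have e : (sqI n + 1) * (sqI n + 1) ≤ j * x :=
      mul_le_mul (by omega) (by omega) (by omega) (by omega)
    omega
  have hdvd : j ∣ n := Dvd.intro x (by linarith [mul_comm x j])
  have hx : PySem.Int.floordiv n j = x := by
    rw [PySem.Int.floordiv_eq_ediv_of_pos (by omega)]
    exact Int.ediv_eq_of_eq_mul_left (by omega) (by linarith [mul_comm x j])
  exact ⟨hj1, hjle, hdvd, by omega, hx.symm⟩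

theorem pairwise_lt_smallD (n : Int) : (smallD n).Pairwise (· < ·) :=
  (PySem.List.pairwise_lt_pyRange_one 1 (sqI n + 1)).filter _

theorem pairwise_lt_bigD_rev (n : Int) : ((bigD n).reverse).Pairwise (· < ·) := by
  rw [List.pairwise_reverse]
  unfold bigD
  rw [List.pairwise_map]
  have hpw : ((PySem.List.pyRange 1 (sqI n + 1) 1).filter
      (fun j => PySem.Int.mod n j == 0 && j != PySem.Int.floordiv n j)).Pairwise (· < ·) :=
    (PySem.List.pairwise_lt_pyRange_one 1 (sqI n + 1)).filter _
  refine List.Pairwise.imp_of_mem ?_ hpw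
  intro a b ha hb hab
  simp only [List.mem_filter, PySem.List.mem_pyRange_one, beq_iff_eq,
    PySem.Int.mod_eq_zero_iff_dvd, Bool.and_eq_true, bne_iff_ne, ne_eq] at ha hb
  obtain ⟨⟨ha1, ha2⟩, ha3, ha4⟩ := ha
  obtain ⟨⟨hb1, hb2⟩, hb3, hb4⟩ := hb
  have hfa := cofactor_facts n a ha1 (by omega) ha3 ha4
  have hfb := cofactor_facts n b hb1 (by omega) hb3 hb4
  have ea : PySem.Int.floordiv n a = n / a :=
    PySem.Int.floordiv_eq_ediv_of_pos (by omega)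
  have eb : PySem.Int.floordiv n b = n / b :=
    PySem.Int.floordiv_eq_ediv_of_pos (by omega)
  rw [ea] at hfa
  rw [eb] at hfb
  rw [ea, eb]
  have hqa : (n / a) * a = n := Int.ediv_mul_cancel ha3
  have hqb : (n / b) * b = n := Int.ediv_mul_cancel hb3
  by_contra hcon
  push_neg at hcon
  have h1 : n / a * a < n / a * b := mul_lt_mul_of_pos_left hab (by omega)
  have h2 : n / a * b ≤ n / b * b := mul_le_mul_of_nonneg_right hcon (by omega)
  omega

theorem nodup_of_pairwise_lt {l : List Int} (h : l.Pairwise (· < ·)) : l.Nodup :=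
  h.imp (fun hab => ne_of_lt hab)

theorem factors_eq (n : Int) : smallD n ++ (bigD n).reverse = divsR n := by
  have pwL : (smallD n ++ (bigD n).reverse).Pairwise (· < ·) := by
    rw [List.pairwise_append]
    refine ⟨pairwise_lt_smallD n, pairwise_lt_bigD_rev n, ?_⟩
    intro a ha b hb
    rw [mem_smallD] at ha
    rw [List.mem_reverse, mem_bigD] at hb
    obtain ⟨j, ⟨hj1, hj2, hj3, hj4⟩, hbj⟩ := hb
    have := cofactor_facts n j hj1 hj2 hj3 hj4
    omega
  have pwR : (divsR n).Pairwise (· < ·) :=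
    (PySem.List.pairwise_lt_pyRange_one 1 (n + 1)).filter _
  have hperm : (smallD n ++ (bigD n).reverse).Perm (divsR n) := by
    rw [List.perm_ext_iff_of_nodup (nodup_of_pairwise_lt pwL) (nodup_of_pairwise_lt pwR)]
    intro x
    rw [List.mem_append, List.mem_reverse, mem_smallD, mem_bigD, mem_divsR]
    constructor
    · rintro (⟨h1, h2, h3⟩ | ⟨j, ⟨hj1, hj2, hj3, hj4⟩, hxj⟩)
      · refine ⟨h1, ?_, h3⟩
        have := (le_sqI_iff n x h1).mp h2
        nlinarith
      · have := cofactor_facts n j hj1 hj2 hj3 hj4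
        exact ⟨by omega, by omega, by rw [hxj]; tauto⟩
    · rintro ⟨h1, h2, h3⟩
      by_cases hsq : x ≤ sqI n
      · exact Or.inl ⟨h1, hsq, h3⟩
      · push_neg at hsq
        have := big_divisor_pair n x h1 h2 h3 hsq
        exact Or.inr ⟨n / x, ⟨this.1, this.2.1, this.2.2.1, this.2.2.2.1⟩, this.2.2.2.2⟩
  exact PySem.List.eq_of_perm_of_pairwise_le_of_injective (fun x => x)
    (fun a b h => h) hperm (pwL.imp le_of_lt) (pwR.imp le_of_lt)

theorem factorsB_eq_pyFactorsA (n : Int) : factorsB n = pyFactorsA n := by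
  unfold factorsB pyFactorsA
  rw [factorLoop_spec n 1 [] [] (by omega), PySem.List.foldl_append_if_eq_filter]
  simp only [List.nil_append]
  simpa [smallD, bigD, divsR] using factors_eq n

-- ===== VERDICT (by name: the statement is the Claim_ definition above) =====
theorem explain_simplify_spec : Claim_equal_explain_simplify := by
  intro num den _ _
  unfold Spec_explain_simplify explain_simplify explain_simplify_alt
  rw [← factorsB_eq_pyFactorsA num, ← factorsB_eq_pyFactorsA den]
  apply strEq
  simp [PySem.Str.toList_join, PySem.Chars.join, List.intercalate, List.intersperse,
    String.toList_append]
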